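-- pv_equiv track=rewrite | github.com/Flyvendedk799/preview | backend/services/design_fidelity_validator.py | _typography_compatible
-- ===== SOURCE A (Python) =====
-- def _typography_compatible(t1: str, t2: str) -> bool:
--     """Check if typography personalities are compatible."""
--     compatible_groups = [
--         ["authoritative", "bold", "expressive"],
--         ["friendly", "playful", "subtle"],
--         ["elegant", "refined", "subtle"],
--         ["technical", "minimal", "subtle"]
--     ]
--
--     for group in compatible_groups:
--         if t1.lower() in group and t2.lower() in group:
--             return True
--     return False
-- ===== SOURCE B (Python) =====
-- def _typography_compatible(t1: str, t2: str) -> bool: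
--     """Check if typography personalities are compatible."""
--     compatible_groups = [
--         ["authoritative", "bold", "expressive"],
--         ["friendly", "playful", "subtle"],
--         ["elegant", "refined", "subtle"],
--         ["technical", "minimal", "subtle"]
--     ]
--
--     index = {}
--     for i, group in enumerate(compatible_groups):
--         for name in group:
--             index.setdefault(name, set()).add(i)
--
--     return bool(index.get(t1.lower(), set()) & index.get(t2.lower(), set()))
-- ===== Notes on version B (the rewrite author's own statement) =====
-- stated objective: alternative
-- what changed: B builds an inverted index mapping each personality name to the set of group ids it belongs to and answers by intersecting the two looked-up id sets, instead of A's scan over the group lists with two membership tests per group.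
import Mathlib
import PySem

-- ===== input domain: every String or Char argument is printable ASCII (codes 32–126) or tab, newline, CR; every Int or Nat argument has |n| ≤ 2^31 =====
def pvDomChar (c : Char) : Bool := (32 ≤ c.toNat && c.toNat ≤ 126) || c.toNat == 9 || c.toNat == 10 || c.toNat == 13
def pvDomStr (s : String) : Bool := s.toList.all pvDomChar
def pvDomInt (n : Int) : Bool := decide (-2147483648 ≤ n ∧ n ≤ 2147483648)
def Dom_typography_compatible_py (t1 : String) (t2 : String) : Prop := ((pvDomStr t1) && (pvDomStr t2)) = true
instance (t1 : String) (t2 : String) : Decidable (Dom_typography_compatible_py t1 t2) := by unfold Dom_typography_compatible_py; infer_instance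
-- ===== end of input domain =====

-- B replaces A's per-call scan over the group lists by an inverted index (personality → set of
-- group ids) looked up once per argument, answering via set intersection (objective: alternative).

-- ===== PORT A =====
-- the compatible_groups literal of A (and of B)
def tcGroups : List (List String) :=
  [["authoritative", "bold", "expressive"],
   ["friendly", "playful", "subtle"],
   ["elegant", "refined", "subtle"],
   ["technical", "minimal", "subtle"]]

-- A's 'for group in compatible_groups: if t1.lower() in group and t2.lower() in group: return True' loop
def tcLoopA (t1 t2 : String) : List (List String) → Bool
  | [] => false
  | g :: rest =>
      if g.contains (PySem.Str.lower t1) && g.contains (PySem.Str.lower t2) then true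
      else tcLoopA t1 t2 rest

def typography_compatible_py (t1 : String) (t2 : String) : Bool :=
  tcLoopA t1 t2 tcGroups

-- ===== PORT B =====
-- B's inverted index: for i, group in enumerate(groups): for name in group: index.setdefault(name, set()).add(i)
def tcIndex : PySem.Dict String (PySem.Set Int) :=
  (PySem.List.enumerate tcGroups).foldl
    (fun d p =>
      p.2.foldl (fun d name => d.modify name PySem.Set.empty (fun s => PySem.Set.add s p.1)) d)
    PySem.Dict.empty

-- bool(index.get(t1.lower(), set()) & index.get(t2.lower(), set()))
def typography_compatible_py_alt (t1 : String) (t2 : String) : Bool :=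
  let s1 := tcIndex.getD (PySem.Str.lower t1) PySem.Set.empty
  let s2 := tcIndex.getD (PySem.Str.lower t2) PySem.Set.empty
  !(PySem.Set.inter s1 s2).isEmpty

-- ===== PRECONDITION & SPEC =====
def Spec_typography_compatible_py (t1 : String) (t2 : String) (out : Bool) : Prop := out = typography_compatible_py_alt t1 t2
instance (t1 : String) (t2 : String) (out : Bool) : Decidable (Spec_typography_compatible_py t1 t2 out) := by unfold Spec_typography_compatible_py; infer_instance

-- ===== CLAIM (what is proved, stated in full; the proofs are below) =====
def Claim_equal_typography_compatible_py : Prop := ∀ (t1 : String) (t2 : String), Dom_typography_compatible_py t1 t2 → Spec_typography_compatible_py t1 t2 (typography_compatible_py t1 t2)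

-- ===== LEMMAS AND PROOFS =====

-- the group-id set of the inverted index, written as a function of the (lowered) name
def tcIdxFun (l : String) : PySem.Set Int :=
  if l = "authoritative" then [0] else if l = "bold" then [0] else if l = "expressive" then [0]
  else if l = "friendly" then [1] else if l = "playful" then [1]
  else if l = "subtle" then [1, 2, 3]
  else if l = "elegant" then [2] else if l = "refined" then [2]
  else if l = "technical" then [3] else if l = "minimal" then [3]
  else []

-- tcLoopA with the lowering hoisted out of the loop (proof helper)
def tcScan (l1 l2 : String) : List (List String) → Bool
  | [] => false
  | g :: rest => if g.contains l1 && g.contains l2 then true else tcScan l1 l2 rest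

lemma tcLoopA_eq_tcScan (t1 t2 : String) (gs : List (List String)) :
    tcLoopA t1 t2 gs = tcScan (PySem.Str.lower t1) (PySem.Str.lower t2) gs := by
  induction gs with
  | nil => rfl
  | cons g rest ih => simp [tcLoopA, tcScan, ih]

lemma tcIndex_eq_mk : tcIndex = PySem.Dict.mk
    [("authoritative", [0]), ("bold", [0]), ("expressive", [0]),
     ("friendly", [1]), ("playful", [1]), ("subtle", [1, 2, 3]),
     ("elegant", [2]), ("refined", [2]),
     ("technical", [3]), ("minimal", [3])] := by decide

lemma tcIndex_getD (l : String) :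
    tcIndex.getD l PySem.Set.empty = tcIdxFun l := by
  unfold tcIdxFun
  split_ifs with h1 h2 h3 h4 h5 h6 h7 h8 h9 h10 <;> subst_vars <;>
    first
    | decide
    | simp [tcIndex_eq_mk, PySem.Dict.getD_eq_get?_getD, PySem.Dict.get?,
        Ne.symm h1, Ne.symm h2, Ne.symm h3, Ne.symm h4, Ne.symm h5, Ne.symm h6,
        Ne.symm h7, Ne.symm h8, Ne.symm h9, Ne.symm h10, PySem.Set.empty]

lemma idx_sub (l : String) : ∀ x ∈ tcIdxFun l, x = 0 ∨ x = 1 ∨ x = 2 ∨ x = 3 := by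
  unfold tcIdxFun; split_ifs <;> simp

lemma cg (l : String) (i : Nat) (hi : i < 4) :
    (tcGroups[i]'(by simpa [tcGroups] using hi)).contains l = (tcIdxFun l).contains ((i : Int)) := by
  unfold tcIdxFun
  split_ifs <;> subst_vars <;> interval_cases i <;>
    first
    | decide
    | simp_all [tcGroups, List.contains_eq_mem]

lemma inter_mem (S1 S2 : List Int) (h : ∀ x ∈ S1, x = 0 ∨ x = 1 ∨ x = 2 ∨ x = 3) :
    (!(PySem.Set.inter S1 S2).isEmpty) =
      (S1.contains 0 && S2.contains 0 || S1.contains 1 && S2.contains 1 ||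
       S1.contains 2 && S2.contains 2 || S1.contains 3 && S2.contains 3) := by
  rw [Bool.eq_iff_iff]
  simp only [PySem.Set.inter, PySem.Set.contains_eq_listContains, List.contains_eq_mem,
    Bool.not_eq_eq_eq_not, Bool.not_true, List.isEmpty_eq_false_iff, ne_eq,
    List.filter_eq_nil_iff, decide_eq_true_eq, not_forall,
    Decidable.not_not, Bool.or_eq_true, Bool.and_eq_true]
  constructor
  · rintro ⟨x, hx1, hx2⟩
    rcases h x hx1 with rfl | rfl | rfl | rfl <;> simp_all
  · rintro (((⟨h1, h2⟩ | ⟨h1, h2⟩) | ⟨h1, h2⟩) | ⟨h1, h2⟩) <;> exact ⟨_, h1, h2⟩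

lemma scan_iff (l1 l2 : String) (gs : List (List String)) :
    tcScan l1 l2 gs = true ↔ ∃ g ∈ gs, l1 ∈ g ∧ l2 ∈ g := by
  induction gs with
  | nil => simp [tcScan]
  | cons g rest ih =>
      have hmem : (g.contains l1 && g.contains l2) = true ↔ (l1 ∈ g ∧ l2 ∈ g) := by
        simp [List.contains_eq_mem]
      simp only [tcScan]
      split_ifs with h
      · exact iff_of_true rfl ⟨g, List.mem_cons_self, hmem.mp h⟩
      · rw [ih, List.exists_mem_cons_iff]
        rw [hmem] at h
        tauto

set_option maxHeartbeats 1000000 in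
lemma tc_main (l1 l2 : String) :
    tcScan l1 l2 tcGroups = !(PySem.Set.inter (tcIdxFun l1) (tcIdxFun l2)).isEmpty := by
  have e0 := fun l => cg l 0 (by omega)
  have e1 := fun l => cg l 1 (by omega)
  have e2 := fun l => cg l 2 (by omega)
  have e3 := fun l => cg l 3 (by omega)
  norm_num at e0 e1 e2 e3
  rw [inter_mem _ _ (idx_sub l1), Bool.eq_iff_iff]
  simp only [List.contains_eq_mem, Bool.or_eq_true, Bool.and_eq_true, decide_eq_true_eq]
  rw [← e0 l1, ← e0 l2, ← e1 l1, ← e1 l2, ← e2 l1, ← e2 l2, ← e3 l1, ← e3 l2]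
  rw [scan_iff]
  simp only [tcGroups, List.mem_cons, List.not_mem_nil, or_false, exists_eq_or_imp,
    exists_eq_left, List.getElem_cons_zero, List.getElem_cons_succ]
  tauto

-- ===== VERDICT (by name: the statement is the Claim_ definition above) =====
theorem typography_compatible_py_spec : Claim_equal_typography_compatible_py := by
  intro t1 t2 _
  unfold Spec_typography_compatible_py typography_compatible_py typography_compatible_py_alt
  rw [tcIndex_getD, tcIndex_getD, tcLoopA_eq_tcScan]
  exact tc_main (PySem.Str.lower t1) (PySem.Str.lower t2)
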